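-- pv_equiv track=rewrite | github.com/cyruszzhou/imagenetcheck | ops.py | get421Precs
-- ===== SOURCE A (Python) =====
-- def get421Precs(alist):
--     four, two, one = 0, 0, 0
--
--     for x in alist:
--         if x[0] == 4:
--             four = x[1]
--
--         if x[0] == 2:
--             two = x[1]
--
--         if x[0] == 1:
--             one = x[1]
--
--     return [one, two, four]
-- ===== SOURCE B (Python) =====
-- def get421Precs(alist):
--     rev = list(reversed(alist))
--
--     def first(k):
--         for x in rev:
--             if x[0] == k:
--                 return x[1]
--         return 0
--
--     return [first(1), first(2), first(4)]
-- ===== Notes on version B (the rewrite author's own statement) =====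
-- stated objective: alternative
-- what changed: A keeps three conditional accumulators in one forward pass; B reverses the list once and does three separate early-exit first-match scans over the reversed list (first match in reverse = A's last-match rule).
import Mathlib
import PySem

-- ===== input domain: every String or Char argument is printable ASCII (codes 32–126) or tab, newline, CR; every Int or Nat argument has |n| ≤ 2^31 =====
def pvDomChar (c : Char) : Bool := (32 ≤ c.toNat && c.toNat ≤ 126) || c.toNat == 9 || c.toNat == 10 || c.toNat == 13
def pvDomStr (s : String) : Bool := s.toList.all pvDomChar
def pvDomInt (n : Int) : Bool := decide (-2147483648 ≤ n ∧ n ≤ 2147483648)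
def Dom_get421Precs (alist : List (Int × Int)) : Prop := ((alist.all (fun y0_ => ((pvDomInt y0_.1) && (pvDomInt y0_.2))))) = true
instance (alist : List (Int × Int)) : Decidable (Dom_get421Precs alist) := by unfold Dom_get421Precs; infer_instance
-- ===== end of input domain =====

-- B reverses the list once and answers each key by an early-exit first-match scan of the reversed list (alternative decomposition, same cost).

-- ===== PORT A =====
def get421Precs (alist : List (Int × Int)) : List Int :=
  let s := alist.foldl (fun (acc : Int × Int × Int) x =>
    let four := if x.1 = 4 then x.2 else acc.1
    let two := if x.1 = 2 then x.2 else acc.2.1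
    let one := if x.1 = 1 then x.2 else acc.2.2
    (four, two, one)) (0, 0, 0)
  [s.2.2, s.2.1, s.1]

-- ===== PORT B =====
-- early-exit for-loop `first(k)` of Source B: return x[1] at the first x with x[0] == k, else 0
def pvFirst (rev : List (Int × Int)) (k : Int) : Int :=
  match rev with
  | [] => 0
  | x :: xs => if x.1 = k then x.2 else pvFirst xs k

def get421Precs_alt (alist : List (Int × Int)) : List Int :=
  let rev := alist.reverse
  [pvFirst rev 1, pvFirst rev 2, pvFirst rev 4]

-- ===== PRECONDITION & SPEC =====
def Spec_get421Precs (alist : List (Int × Int)) (out : List Int) : Prop := out = get421Precs_alt alist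
instance (alist : List (Int × Int)) (out : List Int) : Decidable (Spec_get421Precs alist out) := by unfold Spec_get421Precs; infer_instance

-- ===== CLAIM =====
def Claim_equal_get421Precs : Prop := ∀ (alist : List (Int × Int)), Dom_get421Precs alist → Spec_get421Precs alist (get421Precs alist)

-- ===== LEMMAS AND PROOFS =====
-- first match with a fallback default (generalises pvFirst for the induction)
def fmD (k d : Int) : List (Int × Int) → Int
  | [] => d
  | x :: xs => if x.1 = k then x.2 else fmD k d xs

theorem pvFirst_eq_fmD (k : Int) (l : List (Int × Int)) : pvFirst l k = fmD k 0 l := by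
  induction l with
  | nil => rfl
  | cons x xs ih => simp [pvFirst, fmD, ih]

theorem fmD_snoc (k d : Int) (l : List (Int × Int)) (x : Int × Int) :
    fmD k d (l ++ [x]) = fmD k (if x.1 = k then x.2 else d) l := by
  induction l with
  | nil => rfl
  | cons y ys ih => simp [fmD, ih]

theorem foldl_eq_fmD (xs : List (Int × Int)) (a b c : Int) :
    (xs.foldl (fun (acc : Int × Int × Int) x =>
      let four := if x.1 = 4 then x.2 else acc.1
      let two := if x.1 = 2 then x.2 else acc.2.1
      let one := if x.1 = 1 then x.2 else acc.2.2
      (four, two, one)) (a, b, c)) =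
    (fmD 4 a xs.reverse, fmD 2 b xs.reverse, fmD 1 c xs.reverse) := by
  induction xs generalizing a b c with
  | nil => rfl
  | cons x xs ih =>
    simp only [List.foldl_cons, List.reverse_cons, fmD_snoc]
    exact ih _ _ _

-- ===== VERDICT =====
theorem get421Precs_spec : Claim_equal_get421Precs := by
  intro alist _
  simp only [Spec_get421Precs, get421Precs, get421Precs_alt, pvFirst_eq_fmD, foldl_eq_fmD]
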